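-- pv_equiv track=rewrite | github.com/juryal/aoc_2021 | src/aoc05.py | merge_maps
-- ===== SOURCE A (Python) =====
-- from itertools import zip_longest
--
-- def merge_maps(maps_list):
--     if len(maps_list) == 1:
--         return maps_list[0]
--     else:
--         single_map = maps_list.pop(0)
--         merged_maps = merge_maps(maps_list)
--         outer_zipped = list(zip_longest(single_map, merged_maps, fillvalue=[]))
--         zipped_map = []
--         for zipped_line in outer_zipped:
--             inner_zipped = list(
--                 map(lambda x: x[0] + x[1], zip_longest(*zipped_line, fillvalue=0))
--             )
--             zipped_map.append(inner_zipped)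
--
--         return zipped_map
-- ===== SOURCE B (Python) =====
-- def _add_rows(a, b):
--     n = max(len(a), len(b))
--     return [(a[i] if i < len(a) else 0) + (b[i] if i < len(b) else 0) for i in range(n)]
--
--
-- def _combine(a, b):
--     n = max(len(a), len(b))
--     return [_add_rows(a[i] if i < len(a) else [], b[i] if i < len(b) else [])
--             for i in range(n)]
--
--
-- def merge_maps(maps_list):
--     acc = maps_list[0]
--     for m in maps_list[1:]:
--         acc = _combine(acc, m)
--     return acc
-- ===== Notes on version B (the rewrite author's own statement) =====
-- stated objective: alternative
-- what changed: Replaces A's pop-and-recurse right fold built on zip_longest with an iterative forward left fold whose padded element-wise addition is computed by index over ranges of the maximum lengths; equal because the padded addition is associative.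
-- outside the precondition, e.g. on merge_maps([]): A raises IndexError, B raises IndexError
import Mathlib
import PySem

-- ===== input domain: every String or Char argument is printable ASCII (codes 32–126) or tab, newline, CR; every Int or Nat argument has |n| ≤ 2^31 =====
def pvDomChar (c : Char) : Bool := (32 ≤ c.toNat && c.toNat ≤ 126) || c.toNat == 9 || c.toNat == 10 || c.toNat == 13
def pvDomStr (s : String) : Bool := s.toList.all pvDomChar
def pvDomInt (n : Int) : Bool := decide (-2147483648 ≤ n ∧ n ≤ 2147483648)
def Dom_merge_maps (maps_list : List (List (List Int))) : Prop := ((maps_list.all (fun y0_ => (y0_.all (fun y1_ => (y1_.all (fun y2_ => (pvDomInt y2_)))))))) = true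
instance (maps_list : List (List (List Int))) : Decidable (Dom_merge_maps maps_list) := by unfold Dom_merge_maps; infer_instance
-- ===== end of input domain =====

-- B replaces A's pop-and-recurse right fold (zip_longest padding) by an iterative forward
-- left fold with index-based padded addition; return values proved equal (A also empties its
-- argument down to its last element in place, B does not mutate it — return value only).

-- ===== PORT A =====
-- zip_longest(xs, ys, fillvalue=e) followed by mapping a binary function f over the pairs
-- (when one list is exhausted, zip_longest pairs the rest with the fill value e)
def zipPadL {α β : Type} (f : α → α → β) (e : α) : List α → List α → List β
  | [], ys => ys.map (fun y => f e y)
  | x :: xs, [] => (x :: xs).map (fun x => f x e)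
  | x :: xs, y :: ys => f x y :: zipPadL f e xs ys

-- inner: list(map(lambda x: x[0] + x[1], zip_longest(*zipped_line, fillvalue=0)))
def padAdd (a b : List Int) : List Int := zipPadL (fun x y => x + y) 0 a b

-- outer: zip_longest(single_map, merged_maps, fillvalue=[]) with the inner addition per line
def combineA (a b : List (List Int)) : List (List Int) := zipPadL padAdd [] a b

def merge_maps (maps_list : List (List (List Int))) : List (List Int) :=
  match maps_list with
  | [] => []            -- Python raises IndexError here (pop from empty list); excluded by Pre_
  | [m] => m
  | m :: rest => combineA m (merge_maps rest)

-- ===== PORT B =====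
def addRowsB (a b : List Int) : List Int :=
  (List.range (max a.length b.length)).map (fun i => a.getD i 0 + b.getD i 0)

def combineB (a b : List (List Int)) : List (List Int) :=
  (List.range (max a.length b.length)).map (fun i => addRowsB (a.getD i []) (b.getD i []))

def merge_maps_alt (maps_list : List (List (List Int))) : List (List Int) :=
  match maps_list with
  | [] => []            -- Python raises IndexError here (maps_list[0]); excluded by Pre_
  | h :: t => t.foldl (fun acc m => combineB acc m) h

-- ===== PRECONDITION & SPEC =====
-- A raises IndexError on the empty list (pop(0) from []); B raises IndexError there too.
def Pre_merge_maps (maps_list : List (List (List Int))) : Prop := maps_list ≠ []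
instance (maps_list : List (List (List Int))) : Decidable (Pre_merge_maps maps_list) := by unfold Pre_merge_maps; infer_instance
def pvWitness_merge_maps : List (List (List Int)) := [[[1, 2], [3]], [[4], [], [5, 6]]]

def Spec_merge_maps (maps_list : List (List (List Int))) (out : List (List Int)) : Prop := out = merge_maps_alt maps_list
instance (maps_list : List (List (List Int))) (out : List (List Int)) : Decidable (Spec_merge_maps maps_list out) := by unfold Spec_merge_maps; infer_instance

-- ===== CLAIM (what is proved, stated in full; the proofs are below) =====
def Claim_equal_merge_maps : Prop := ∀ (maps_list : List (List (List Int))), Dom_merge_maps maps_list → Pre_merge_maps maps_list → Spec_merge_maps maps_list (merge_maps maps_list)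

-- ===== LEMMAS AND PROOFS =====

theorem map_range_getD {α β : Type} (e : α) (g : α → β) :
    ∀ b : List α, (List.range b.length).map (fun i => g (b.getD i e)) = b.map g := by
  intro b
  induction b with
  | nil => rfl
  | cons y ys ih =>
    simp only [List.length_cons, List.range_succ_eq_map, List.map_cons, List.map_map,
      List.getD_cons_zero, List.map_cons]
    refine congrArg (g y :: ·) ?_
    rw [← ih]
    apply List.map_congr_left
    intro i _
    rfl

-- index characterisation: zipPadL equals the range/map form used by B
theorem zipPadL_eq_range {α β : Type} (f : α → α → β) (e : α) :
    ∀ a b : List α, zipPadL f e a b =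
      (List.range (max a.length b.length)).map (fun i => f (a.getD i e) (b.getD i e)) := by
  intro a
  induction a with
  | nil =>
    intro b
    simp only [zipPadL, List.length_nil, Nat.zero_max]
    rw [← map_range_getD e (fun y => f e y) b]
    apply List.map_congr_left
    intro i _
    simp
  | cons x xs ih =>
    intro b
    cases b with
    | nil =>
      simp only [zipPadL, List.length_nil, Nat.max_zero]
      rw [← map_range_getD e (fun x => f x e) (x :: xs)]
      apply List.map_congr_left
      intro i _
      simp
    | cons y ys =>
      simp only [zipPadL, ih ys, List.length_cons, Nat.succ_max_succ,
        List.range_succ_eq_map, List.map_cons, List.map_map]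
      refine congrArg (f x y :: ·) ?_
      apply List.map_congr_left
      intro i _
      rfl

theorem addRowsB_eq (a b : List Int) : addRowsB a b = padAdd a b := by
  rw [addRowsB, padAdd, zipPadL_eq_range]

theorem combineB_eq (a b : List (List Int)) : combineB a b = combineA a b := by
  rw [combineB, combineA, zipPadL_eq_range]
  apply List.map_congr_left; intro i _; rw [addRowsB_eq]

-- padded addition: neutral element and associativity
theorem padAdd_nil_left (b : List Int) : padAdd [] b = b := by
  simp [padAdd, zipPadL]

theorem padAdd_nil_right (a : List Int) : padAdd a [] = a := by
  cases a with
  | nil => rfl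
  | cons x xs => simp [padAdd, zipPadL]

theorem padAdd_assoc : ∀ a b c : List Int, padAdd (padAdd a b) c = padAdd a (padAdd b c) := by
  intro a
  induction a with
  | nil => intro b c; rw [padAdd_nil_left, padAdd_nil_left]
  | cons x xs ih =>
    intro b c
    cases b with
    | nil => rw [padAdd_nil_right, padAdd_nil_left]
    | cons y ys =>
      cases c with
      | nil => rw [padAdd_nil_right, padAdd_nil_right]
      | cons z zs =>
        show padAdd ((x + y) :: padAdd xs ys) (z :: zs)
          = padAdd (x :: xs) ((y + z) :: padAdd ys zs)
        show (x + y + z) :: padAdd (padAdd xs ys) zs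
          = (x + (y + z)) :: padAdd xs (padAdd ys zs)
        rw [ih ys zs, Int.add_assoc]

theorem combineA_nil_left (b : List (List Int)) : combineA [] b = b := by
  induction b with
  | nil => rfl
  | cons y ys ih =>
    show padAdd [] y :: List.map (fun y => padAdd [] y) ys = y :: ys
    rw [padAdd_nil_left]
    exact congrArg (y :: ·) ih

theorem combineA_nil_right (a : List (List Int)) : combineA a [] = a := by
  cases a with
  | nil => rfl
  | cons x xs =>
    show List.map (fun r => padAdd r []) (x :: xs) = x :: xs
    have : ∀ l : List (List Int), List.map (fun r => padAdd r []) l = l := by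
      intro l
      induction l with
      | nil => rfl
      | cons h t ih => simp [padAdd_nil_right]
    exact this (x :: xs)

theorem combineA_assoc : ∀ a b c : List (List Int),
    combineA (combineA a b) c = combineA a (combineA b c) := by
  intro a
  induction a with
  | nil => intro b c; rw [combineA_nil_left, combineA_nil_left]
  | cons x xs ih =>
    intro b c
    cases b with
    | nil => rw [combineA_nil_right, combineA_nil_left]
    | cons y ys =>
      cases c with
      | nil => rw [combineA_nil_right, combineA_nil_right]
      | cons z zs =>
        show combineA (padAdd x y :: combineA xs ys) (z :: zs)
          = combineA (x :: xs) (padAdd y z :: combineA ys zs)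
        show padAdd (padAdd x y) z :: combineA (combineA xs ys) zs
          = padAdd x (padAdd y z) :: combineA xs (combineA ys zs)
        rw [ih ys zs, padAdd_assoc]

-- the forward left fold with combineA equals A's right-recursive merge
theorem foldl_combineA : ∀ (l : List (List (List Int))) (acc : List (List Int)),
    l.foldl (fun a m => combineA a m) acc =
      (match l with | [] => acc | _ :: _ => combineA acc (merge_maps l)) := by
  intro l
  induction l with
  | nil => intro acc; rfl
  | cons x xs ih =>
    intro acc
    show (x :: xs).foldl (fun a m => combineA a m) acc = combineA acc (merge_maps (x :: xs))
    rw [List.foldl_cons, ih (combineA acc x)]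
    cases xs with
    | nil => simp [merge_maps]
    | cons x' xs' =>
      show combineA (combineA acc x) (merge_maps (x' :: xs'))
        = combineA acc (merge_maps (x :: x' :: xs'))
      rw [combineA_assoc]
      rfl

theorem foldl_combineB_eq (l : List (List (List Int))) :
    ∀ acc, l.foldl (fun a m => combineB a m) acc = l.foldl (fun a m => combineA a m) acc := by
  induction l with
  | nil => intro acc; rfl
  | cons x xs ih => intro acc; rw [List.foldl_cons, List.foldl_cons, combineB_eq, ih]

-- ===== VERDICT (by name: the statement is the Claim_ definition above) =====
theorem merge_maps_spec : Claim_equal_merge_maps := by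
  intro maps_list _hDom hPre
  unfold Spec_merge_maps
  cases maps_list with
  | nil => exact absurd rfl hPre
  | cons h t =>
    show merge_maps (h :: t) = merge_maps_alt (h :: t)
    show merge_maps (h :: t) = t.foldl (fun acc m => combineB acc m) h
    rw [foldl_combineB_eq, foldl_combineA]
    cases t with
    | nil => rfl
    | cons x' xs' => rfl
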